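-- pv_equiv track=rewrite | github.com/AminBidad1/trellomize | office/models.py | _is_encrypted_password
-- ===== SOURCE A (Python) =====
-- def _is_encrypted_password(password: str) -> bool:
--     if password:
--         if len(password) == 64:
--             for char in password:
--                 if char not in "0123456789abcdef":
--                     return False
--             return True
--         return False
--     return False
-- ===== SOURCE B (Python) =====
-- import re
--
-- _HEX64 = re.compile(r'[0-9a-f]{64}')
--
-- def _is_encrypted_password(password: str) -> bool:
--     return bool(_HEX64.fullmatch(password or ''))
-- ===== Notes on version B (the rewrite author's own statement) =====
-- stated objective: idiomatic
-- what changed: Replaced the explicit length check plus character-by-character loop with early return by a single precompiled regex fullmatch of the pattern [0-9a-f]{64}, guarding falsy input by substituting the empty string first.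
import Mathlib
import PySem

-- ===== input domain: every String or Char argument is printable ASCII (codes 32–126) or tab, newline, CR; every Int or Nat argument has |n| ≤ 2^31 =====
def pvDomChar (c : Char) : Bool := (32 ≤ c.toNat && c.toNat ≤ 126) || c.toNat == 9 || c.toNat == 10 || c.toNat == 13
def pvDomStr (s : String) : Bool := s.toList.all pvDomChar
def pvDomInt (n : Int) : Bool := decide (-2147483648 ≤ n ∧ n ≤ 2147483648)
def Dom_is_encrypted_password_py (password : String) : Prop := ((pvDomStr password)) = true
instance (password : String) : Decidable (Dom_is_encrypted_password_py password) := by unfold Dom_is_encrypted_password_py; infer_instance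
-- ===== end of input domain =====

-- B replaces A's explicit per-character loop (early return on the first non-hex char)
-- by a single regex full-match of r'[0-9a-f]{64}' — more idiomatic, same O(n) cost.

-- ===== PORT A =====
-- the for-loop over the characters: early `return False` on a char outside "0123456789abcdef"
def pvLoopA : List Char → Bool
  | [] => true
  | c :: rest => if ("0123456789abcdef".toList.contains c) = false then false else pvLoopA rest

def is_encrypted_password_py (password : String) : Bool :=
  if password ≠ "" then
    if PySem.Str.len password = 64 then pvLoopA password.toList
    else false
  else false

-- ===== PORT B =====
-- the regex engine's character class [0-9a-f]: two codepoint ranges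
def pvHex (c : Char) : Bool := (('0' ≤ c && c ≤ '9') || ('a' ≤ c && c ≤ 'f'))

-- fullmatch of r'[0-9a-f]{64}' against `password or ''` (identity on strings):
-- exactly 64 characters, each in the class
def is_encrypted_password_py_alt (password : String) : Bool :=
  (password.toList.length == 64) && password.toList.all pvHex

-- ===== PRECONDITION & SPEC =====
def Spec_is_encrypted_password_py (password : String) (out : Bool) : Prop := out = is_encrypted_password_py_alt password
instance (password : String) (out : Bool) : Decidable (Spec_is_encrypted_password_py password out) := by unfold Spec_is_encrypted_password_py; infer_instance

-- ===== CLAIM (what is proved, stated in full; the proofs are below) =====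
def Claim_equal_is_encrypted_password_py : Prop := ∀ (password : String), Dom_is_encrypted_password_py password → Spec_is_encrypted_password_py password (is_encrypted_password_py password)

-- ===== LEMMAS AND PROOFS =====

-- membership in "0123456789abcdef" coincides with the [0-9a-f] codepoint ranges
theorem hex_mem (c : Char) : ("0123456789abcdef".toList.contains c) = pvHex c := by
  have key : ∀ (d : Char), (c = d) = (c.val.toNat = d.val.toNat) :=
    fun d => propext ⟨fun h => by rw [h], fun h => Char.ext (UInt32.toNat_inj.mp h)⟩
  rw [Bool.eq_iff_iff]
  simp only [List.contains_eq_mem, decide_eq_true_eq,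
    show ("0123456789abcdef".toList) = ['0','1','2','3','4','5','6','7','8','9','a','b','c','d','e','f'] from rfl,
    List.mem_cons, List.not_mem_nil, or_false, pvHex, Bool.or_eq_true, Bool.and_eq_true,
    decide_eq_true_eq, Char.le_def, UInt32.le_iff_toNat_le, key,
    show ('0':Char).val.toNat = 48 from rfl, show ('1':Char).val.toNat = 49 from rfl,
    show ('2':Char).val.toNat = 50 from rfl, show ('3':Char).val.toNat = 51 from rfl,
    show ('4':Char).val.toNat = 52 from rfl, show ('5':Char).val.toNat = 53 from rfl,
    show ('6':Char).val.toNat = 54 from rfl, show ('7':Char).val.toNat = 55 from rfl,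
    show ('8':Char).val.toNat = 56 from rfl, show ('9':Char).val.toNat = 57 from rfl,
    show ('a':Char).val.toNat = 97 from rfl, show ('b':Char).val.toNat = 98 from rfl,
    show ('c':Char).val.toNat = 99 from rfl, show ('d':Char).val.toNat = 100 from rfl,
    show ('e':Char).val.toNat = 101 from rfl, show ('f':Char).val.toNat = 102 from rfl]
  omega

-- A's early-return loop equals the all-characters test
theorem loopA_eq_all (l : List Char) : pvLoopA l = l.all pvHex := by
  induction l with
  | nil => rfl
  | cons c rest ih =>
    simp only [pvLoopA, List.all_cons, hex_mem, ih]
    cases pvHex c <;> simp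

-- ===== VERDICT (by name: the statement is the Claim_ definition above) =====
theorem is_encrypted_password_py_spec : Claim_equal_is_encrypted_password_py := by
  intro password _
  show is_encrypted_password_py password = is_encrypted_password_py_alt password
  unfold is_encrypted_password_py is_encrypted_password_py_alt
  by_cases hE : password = ""
  · subst hE; decide
  · simp only [hE, ne_eq, not_false_iff, if_true]
    have hTL : password.toList.length = password.length := String.length_toList
    by_cases hL : password.length = 64
    · simp [hL, hTL, loopA_eq_all]
    · have h64 : ¬((password.length : Int) = 64) := by exact_mod_cast hL
      simp [h64, hL, hTL]
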